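-- pv_equiv track=rewrite | github.com/benholmgren/google_foobar | solution3.py | solution
-- ===== SOURCE A (Python) =====
-- def solution(x, y):
--     distToEnd = y - 1
--     # compute out the base
--     id = 0
--     i = 1
--     prev = 0
--     while i <= x + distToEnd:
--         id = i + prev
--         i += 1
--         prev = id
--     return id - distToEnd
-- ===== SOURCE B (Python) =====
-- def solution(x, y):
--     n = x + y - 1
--     tri = n * (n + 1) // 2 if n > 0 else 0
--     return tri - (y - 1)
-- ===== Notes on version B (the rewrite author's own statement) =====
-- stated objective: faster
-- what changed: replaced the O(x+y) triangular-number accumulation loop with the closed form n*(n+1)//2 at n = x+y-1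
import Mathlib
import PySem

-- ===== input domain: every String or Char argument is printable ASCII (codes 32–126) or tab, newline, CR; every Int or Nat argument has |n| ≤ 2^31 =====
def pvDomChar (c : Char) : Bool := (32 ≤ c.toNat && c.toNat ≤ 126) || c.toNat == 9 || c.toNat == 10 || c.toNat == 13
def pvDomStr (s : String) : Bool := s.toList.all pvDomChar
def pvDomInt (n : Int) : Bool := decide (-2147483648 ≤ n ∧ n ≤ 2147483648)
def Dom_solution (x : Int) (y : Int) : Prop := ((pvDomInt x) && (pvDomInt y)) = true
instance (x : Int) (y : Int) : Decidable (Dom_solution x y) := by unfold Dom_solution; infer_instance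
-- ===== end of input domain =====

-- B replaces A's O(x+y) accumulation loop with the closed-form triangular number n*(n+1)//2.

-- ===== PORT A =====
-- the while loop: state (i, prev, id); while i ≤ N: id = i + prev; i += 1; prev = id
def solutionLoop (N : Int) (i : Int) (prev : Int) (id : Int) : Int :=
  if h : i ≤ N then solutionLoop N (i + 1) (i + prev) (i + prev) else id
termination_by (N + 1 - i).toNat
decreasing_by omega

def solution (x : Int) (y : Int) : Int :=
  let distToEnd := y - 1
  solutionLoop (x + distToEnd) 1 0 0 - distToEnd

-- ===== PORT B =====
def solution_alt (x : Int) (y : Int) : Int :=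
  let n := x + y - 1
  let tri := if n > 0 then PySem.Int.floordiv (n * (n + 1)) 2 else 0
  tri - (y - 1)

-- ===== PRECONDITION & SPEC =====
def Spec_solution (x : Int) (y : Int) (out : Int) : Prop := out = solution_alt x y
instance (x : Int) (y : Int) (out : Int) : Decidable (Spec_solution x y out) := by unfold Spec_solution; infer_instance

-- ===== CLAIM (what is proved, stated in full; the proofs are below) =====
def Claim_equal_solution : Prop := ∀ (x : Int) (y : Int), Dom_solution x y → Spec_solution x y (solution x y)

-- ===== LEMMAS AND PROOFS =====
def triInt (n : Int) : Int := PySem.Int.floordiv (n * (n + 1)) 2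

theorem triInt_succ (i : Int) (hi : 1 ≤ i) : triInt i = i + triInt (i - 1) := by
  unfold triInt
  rw [PySem.Int.floordiv_eq_ediv_of_pos (by omega), PySem.Int.floordiv_eq_ediv_of_pos (by omega)]
  have h1 : i * (i + 1) = (i - 1) * i + 2 * i := by ring
  have h2 : (i - 1) * (i - 1 + 1) = (i - 1) * i := by ring
  omega

theorem solutionLoop_stop (N i prev id : Int) (h : ¬ i ≤ N) : solutionLoop N i prev id = id := by
  unfold solutionLoop; simp [h]

theorem solutionLoop_inv (k : Nat) : ∀ (N i id : Int), (N + 1 - i).toNat = k →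
    1 ≤ i → i ≤ N → solutionLoop N i (triInt (i - 1)) id = triInt N := by
  induction k with
  | zero => intro N i id hk h1 h2; omega
  | succ k ih =>
    intro N i id hk h1 h2
    rw [solutionLoop]
    simp only [h2, dite_true]
    have hstep : i + triInt (i - 1) = triInt i := (triInt_succ i h1).symm
    rw [hstep]
    by_cases hle : i + 1 ≤ N
    · have := ih N (i + 1) (triInt i) (by omega) (by omega) hle
      simpa using this
    · have hiN : i = N := by omega
      rw [solutionLoop_stop _ _ _ _ (by omega)]
      rw [hiN]

theorem solution_eq_alt (x y : Int) : solution x y = solution_alt x y := by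
  unfold solution solution_alt
  simp only []
  by_cases h : 1 ≤ x + (y - 1)
  · have h0 : triInt (1 - 1) = 0 := by decide
    have := solutionLoop_inv (x + (y - 1)).toNat (x + (y - 1)) 1 0 (by omega) (by omega) h
    rw [h0] at this
    rw [this]
    have hpos : x + y - 1 > 0 := by omega
    simp only [hpos, if_true]
    unfold triInt
    congr 1
    ring_nf
  · rw [solutionLoop_stop _ _ _ _ (by omega)]
    have : ¬ (x + y - 1 > 0) := by omega
    simp only [this, if_false]

-- ===== VERDICT (by name: the statement is the Claim_ definition above) =====
theorem solution_spec : Claim_equal_solution := by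
  intro x y _
  unfold Spec_solution
  exact solution_eq_alt x y
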